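-- pv_equiv track=rewrite | github.com/JeremyYyc/Safescan_agent | backend/app/agents/scene_agent.py | _infer_room_from_yolo
-- ===== SOURCE A (Python) =====
-- from typing import Dict, Any, List
--
-- def _infer_room_from_yolo(objects: List[str]) -> str:
--     if not objects:
--         return "Unknown"
--     obj_set = {str(obj).lower() for obj in objects}
--
--     bathroom = {"toilet", "sink", "bathtub", "toothbrush", "hair drier"}
--     kitchen = {"microwave", "oven", "refrigerator", "sink", "toaster", "knife", "spoon", "fork"}
--     bedroom = {"bed"}
--     dining = {"dining table"}
--     living = {"couch", "sofa", "tv", "chair"}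
--     laundry = {"washing machine"}
--
--     if obj_set & bathroom:
--         return "Bathroom"
--     if obj_set & kitchen:
--         return "Kitchen"
--     if obj_set & bedroom:
--         return "Bedroom"
--     if obj_set & dining:
--         return "Dining Room"
--     if obj_set & living:
--         return "Living Room"
--     if obj_set & laundry:
--         return "Laundry"
--     return "Unknown"
-- ===== SOURCE B (Python) =====
-- _ROOMS = [
--     ("Bathroom", ["toilet", "sink", "bathtub", "toothbrush", "hair drier"]),
--     ("Kitchen", ["microwave", "oven", "refrigerator", "sink", "toaster", "knife", "spoon", "fork"]),
--     ("Bedroom", ["bed"]),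
--     ("Dining Room", ["dining table"]),
--     ("Living Room", ["couch", "sofa", "tv", "chair"]),
--     ("Laundry", ["washing machine"]),
-- ]
--
-- # Inverted index: label -> rank of its highest-priority room (setdefault keeps the first,
-- # i.e. best-priority, room for shared labels such as "sink").
-- _INDEX = {}
-- for _rank, (_room, _labels) in enumerate(_ROOMS):
--     for _label in _labels:
--         _INDEX.setdefault(_label, _rank)
--
-- def _infer_room_from_yolo(objects):
--     if not objects:
--         return "Unknown"
--     best = len(_ROOMS)
--     for obj in objects:
--         best = min(best, _INDEX.get(str(obj).lower(), len(_ROOMS)))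
--     if best == len(_ROOMS):
--         return "Unknown"
--     return _ROOMS[best][0]
-- ===== Notes on version B (the rewrite author's own statement) =====
-- stated objective: idiomatic
-- what changed: Replaced the six hard-coded set intersections and if-chain by an inverted label-to-room-rank index built once with setdefault (so the shared label 'sink' keeps its highest-priority room) plus a single min-rank pass over the objects.
import Mathlib
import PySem

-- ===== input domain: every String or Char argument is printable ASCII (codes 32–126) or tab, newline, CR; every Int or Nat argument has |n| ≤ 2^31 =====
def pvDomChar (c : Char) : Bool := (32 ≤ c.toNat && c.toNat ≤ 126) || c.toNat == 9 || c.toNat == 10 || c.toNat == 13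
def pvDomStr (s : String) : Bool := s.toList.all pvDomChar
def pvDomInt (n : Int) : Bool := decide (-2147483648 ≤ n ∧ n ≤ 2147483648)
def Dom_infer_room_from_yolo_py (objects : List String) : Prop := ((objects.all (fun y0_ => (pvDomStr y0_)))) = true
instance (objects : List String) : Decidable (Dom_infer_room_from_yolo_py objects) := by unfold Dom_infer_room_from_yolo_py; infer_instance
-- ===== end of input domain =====

-- B replaces A's six ordered set intersections by an inverted label→room-rank index built once
-- plus a single min-rank pass over the objects (objective: idiomatic/alternative; same asymptotic cost).

-- ===== PORT A =====
def infer_room_from_yolo_py (objects : List String) : String :=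
  if objects = [] then "Unknown"
  else
    let obj_set : PySem.Set String := PySem.Set.ofList (objects.map (fun obj => PySem.Str.lower obj))
    let bathroom : PySem.Set String := PySem.Set.ofList ["toilet", "sink", "bathtub", "toothbrush", "hair drier"]
    let kitchen : PySem.Set String := PySem.Set.ofList ["microwave", "oven", "refrigerator", "sink", "toaster", "knife", "spoon", "fork"]
    let bedroom : PySem.Set String := PySem.Set.ofList ["bed"]
    let dining : PySem.Set String := PySem.Set.ofList ["dining table"]
    let living : PySem.Set String := PySem.Set.ofList ["couch", "sofa", "tv", "chair"]
    let laundry : PySem.Set String := PySem.Set.ofList ["washing machine"]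
    if PySem.Set.inter obj_set bathroom ≠ [] then "Bathroom"
    else if PySem.Set.inter obj_set kitchen ≠ [] then "Kitchen"
    else if PySem.Set.inter obj_set bedroom ≠ [] then "Bedroom"
    else if PySem.Set.inter obj_set dining ≠ [] then "Dining Room"
    else if PySem.Set.inter obj_set living ≠ [] then "Living Room"
    else if PySem.Set.inter obj_set laundry ≠ [] then "Laundry"
    else "Unknown"

-- ===== PORT B =====
def pvRooms : List (String × List String) :=
  [("Bathroom", ["toilet", "sink", "bathtub", "toothbrush", "hair drier"]),
   ("Kitchen", ["microwave", "oven", "refrigerator", "sink", "toaster", "knife", "spoon", "fork"]),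
   ("Bedroom", ["bed"]),
   ("Dining Room", ["dining table"]),
   ("Living Room", ["couch", "sofa", "tv", "chair"]),
   ("Laundry", ["washing machine"])]

-- module-level index build: for rank, (room, labels) in enumerate(_ROOMS): for label in labels: _INDEX.setdefault(label, rank)
def pvIndex : PySem.Dict String Int :=
  (PySem.List.enumerate pvRooms).foldl
    (fun d p => p.2.2.foldl (fun d lab => PySem.Dict.setdefault d lab p.1) d)
    PySem.Dict.empty

def infer_room_from_yolo_py_alt (objects : List String) : String :=
  if objects = [] then "Unknown"
  else
    let n : Int := (pvRooms.length : Int)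
    let best : Int :=
      objects.foldl (fun b obj => min b (PySem.Dict.getD pvIndex (PySem.Str.lower obj) n)) n
    if best = n then "Unknown"
    else
      match PySem.List.pyGet? pvRooms best with
      | some p => p.1
      | none => "Unknown"   -- unreachable: 0 ≤ best < len(_ROOMS) here (Python would raise IndexError)

-- ===== PRECONDITION & SPEC =====
def Spec_infer_room_from_yolo_py (objects : List String) (out : String) : Prop := out = infer_room_from_yolo_py_alt objects
instance (objects : List String) (out : String) : Decidable (Spec_infer_room_from_yolo_py objects out) := by unfold Spec_infer_room_from_yolo_py; infer_instance

-- ===== CLAIM (what is proved, stated in full; the proofs are below) =====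
def Claim_equal_infer_room_from_yolo_py : Prop := ∀ (objects : List String), Dom_infer_room_from_yolo_py objects → Spec_infer_room_from_yolo_py objects (infer_room_from_yolo_py objects)

-- ===== LEMMAS AND PROOFS =====

-- rank of one (already lowercased) label in B's index
def pvRk (x : String) : Int := PySem.Dict.getD pvIndex x 6

set_option maxHeartbeats 1000000 in
lemma pvIndex_eq : pvIndex = { items := [("toilet",0),("sink",0),("bathtub",0),("toothbrush",0),("hair drier",0),("microwave",1),("oven",1),("refrigerator",1),("toaster",1),("knife",1),("spoon",1),("fork",1),("bed",2),("dining table",3),("couch",4),("sofa",4),("tv",4),("chair",4),("washing machine",5)] } := by decide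

set_option maxHeartbeats 1000000 in
lemma pvRk_spec (x : String) :
    pvRk x =
      if x ∈ ["toilet", "sink", "bathtub", "toothbrush", "hair drier"] then 0
      else if x ∈ ["microwave", "oven", "refrigerator", "sink", "toaster", "knife", "spoon", "fork"] then 1
      else if x ∈ ["bed"] then 2
      else if x ∈ ["dining table"] then 3
      else if x ∈ ["couch", "sofa", "tv", "chair"] then 4
      else if x ∈ ["washing machine"] then 5
      else 6 := by
  simp only [pvRk, pvIndex_eq]
  by_cases h0 : x ∈ ["toilet", "sink", "bathtub", "toothbrush", "hair drier"]
  · rw [if_pos h0]; fin_cases h0 <;> decide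
  rw [if_neg h0]
  by_cases h1 : x ∈ ["microwave", "oven", "refrigerator", "sink", "toaster", "knife", "spoon", "fork"]
  · rw [if_pos h1]; fin_cases h1 <;> first | decide | (exact absurd (by decide) h0)
  rw [if_neg h1]
  by_cases h2 : x ∈ ["bed"]
  · rw [if_pos h2]; fin_cases h2; decide
  rw [if_neg h2]
  by_cases h3 : x ∈ ["dining table"]
  · rw [if_pos h3]; fin_cases h3; decide
  rw [if_neg h3]
  by_cases h4 : x ∈ ["couch", "sofa", "tv", "chair"]
  · rw [if_pos h4]; fin_cases h4 <;> decide
  rw [if_neg h4]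
  by_cases h5 : x ∈ ["washing machine"]
  · rw [if_pos h5]; fin_cases h5; decide
  rw [if_neg h5]
  have hnone : PySem.Dict.get? { items := [("toilet",(0:Int)),("sink",0),("bathtub",0),("toothbrush",0),("hair drier",0),("microwave",1),("oven",1),("refrigerator",1),("toaster",1),("knife",1),("spoon",1),("fork",1),("bed",2),("dining table",3),("couch",4),("sofa",4),("tv",4),("chair",4),("washing machine",5)] } x = none := by
    rw [PySem.Dict.get?_eq_none_iff_not_mem_keys]
    simp only [PySem.Dict.keys_mk]
    intro hmem
    fin_cases hmem <;>
      first
        | exact h0 (by decide)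
        | exact h1 (by decide)
        | exact h2 (by decide)
        | exact h3 (by decide)
        | exact h4 (by decide)
        | exact h5 (by decide)
  show (PySem.Dict.get? _ x).getD 6 = 6
  rw [hnone]
  rfl

lemma foldl_min_le_iff (f : String → Int) (l : List String) (a k : Int) :
    l.foldl (fun b y => min b (f y)) a ≤ k ↔ a ≤ k ∨ ∃ y ∈ l, f y ≤ k := by
  induction l generalizing a with
  | nil => simp
  | cons x t ih =>
      simp [ih]
      tauto

lemma le_foldl_min_iff (f : String → Int) (l : List String) (a k : Int) :
    k ≤ l.foldl (fun b y => min b (f y)) a ↔ k ≤ a ∧ ∀ y ∈ l, k ≤ f y := by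
  induction l generalizing a with
  | nil => simp
  | cons x t ih =>
      simp [ih]
      tauto

lemma inter_ne_nil_iff (s t : PySem.Set String) :
    ¬ PySem.Set.inter s t = [] ↔ ∃ y, y ∈ s ∧ y ∈ t := by
  constructor
  · intro h
    obtain ⟨y, hy⟩ := List.exists_mem_of_ne_nil _ h
    exact ⟨y, (PySem.Set.mem_inter s t y).mp hy⟩
  · rintro ⟨y, h1, h2⟩ hnil
    have := (PySem.Set.mem_inter s t y).mpr ⟨h1, h2⟩
    rw [hnil] at this
    simp at this

lemma cond_iff (objects labs : List String) :
    (¬ PySem.Set.inter (PySem.Set.ofList (List.map (fun obj => PySem.Str.lower obj) objects))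
        (PySem.Set.ofList labs) = []) ↔ ∃ o ∈ objects, PySem.Str.lower o ∈ labs := by
  rw [inter_ne_nil_iff]
  constructor
  · rintro ⟨y, hyL, hyS⟩
    rw [PySem.Set.mem_ofList _ _] at hyL hyS
    obtain ⟨o, ho, rfl⟩ := List.mem_map.mp hyL
    exact ⟨o, ho, hyS⟩
  · rintro ⟨o, ho, h⟩
    exact ⟨PySem.Str.lower o, (PySem.Set.mem_ofList _ _).mpr (List.mem_map.mpr ⟨o, ho, rfl⟩),
      (PySem.Set.mem_ofList _ _).mpr h⟩

lemma best_eq (objects : List String) (i : Int) (hi6 : i ≤ 6)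
    (hlo : ∀ o ∈ objects, i ≤ pvRk (PySem.Str.lower o))
    (hhi : ∃ o ∈ objects, pvRk (PySem.Str.lower o) ≤ i) :
    List.foldl (fun b obj => min b (PySem.Dict.getD pvIndex (PySem.Str.lower obj) 6)) 6 objects = i :=
  le_antisymm ((foldl_min_le_iff (fun o => pvRk (PySem.Str.lower o)) _ _ _).mpr (Or.inr hhi))
    ((le_foldl_min_iff (fun o => pvRk (PySem.Str.lower o)) _ _ _).mpr ⟨hi6, hlo⟩)

lemma best_eq_six (objects : List String)
    (hlo : ∀ o ∈ objects, 6 ≤ pvRk (PySem.Str.lower o)) :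
    List.foldl (fun b obj => min b (PySem.Dict.getD pvIndex (PySem.Str.lower obj) 6)) 6 objects = 6 :=
  le_antisymm ((foldl_min_le_iff (fun o => pvRk (PySem.Str.lower o)) _ _ _).mpr (Or.inl le_rfl))
    ((le_foldl_min_iff (fun o => pvRk (PySem.Str.lower o)) _ _ _).mpr ⟨le_rfl, hlo⟩)

lemma infer_room_eq (objects : List String) :
    infer_room_from_yolo_py objects = infer_room_from_yolo_py_alt objects := by
  by_cases hnil : objects = []
  · simp [infer_room_from_yolo_py, infer_room_from_yolo_py_alt, hnil]
  simp only [infer_room_from_yolo_py, infer_room_from_yolo_py_alt, if_neg hnil]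
  have hlen : ((pvRooms.length : Nat) : Int) = 6 := by norm_num [pvRooms]
  simp only [ne_eq, hlen]
  by_cases h0 : ∃ o ∈ objects, PySem.Str.lower o ∈ ["toilet", "sink", "bathtub", "toothbrush", "hair drier"]
  · rw [if_pos ((cond_iff _ _).mpr h0)]
    obtain ⟨o, ho, hmem⟩ := h0
    have hlo : ∀ o ∈ objects, (0:Int) ≤ pvRk (PySem.Str.lower o) := by
      intro o ho
      rw [pvRk_spec]
      split_ifs <;> norm_num
    have hhi : pvRk (PySem.Str.lower o) ≤ 0 := by
      rw [pvRk_spec]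
      split_ifs; omega
    rw [best_eq objects 0 (by norm_num) hlo ⟨o, ho, hhi⟩]
    decide
  rw [if_neg (fun hc => h0 ((cond_iff _ _).mp hc))]
  by_cases h1 : ∃ o ∈ objects, PySem.Str.lower o ∈ ["microwave", "oven", "refrigerator", "sink", "toaster", "knife", "spoon", "fork"]
  · rw [if_pos ((cond_iff _ _).mpr h1)]
    obtain ⟨o, ho, hmem⟩ := h1
    have hlo : ∀ o ∈ objects, (1:Int) ≤ pvRk (PySem.Str.lower o) := by
      intro o ho
      rw [pvRk_spec]
      split_ifs with q0 <;>
        first | omega | (exfalso; exact h0 ⟨o, ho, q0⟩)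
    have hhi : pvRk (PySem.Str.lower o) ≤ 1 := by
      rw [pvRk_spec]
      split_ifs <;> omega
    rw [best_eq objects 1 (by norm_num) hlo ⟨o, ho, hhi⟩]
    decide
  rw [if_neg (fun hc => h1 ((cond_iff _ _).mp hc))]
  by_cases h2 : ∃ o ∈ objects, PySem.Str.lower o ∈ ["bed"]
  · rw [if_pos ((cond_iff _ _).mpr h2)]
    obtain ⟨o, ho, hmem⟩ := h2
    have hlo : ∀ o ∈ objects, (2:Int) ≤ pvRk (PySem.Str.lower o) := by
      intro o ho
      rw [pvRk_spec]
      split_ifs with q0 q1 <;>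
        first | omega | (exfalso; first | exact h0 ⟨o, ho, q0⟩ | exact h1 ⟨o, ho, q1⟩)
    have hhi : pvRk (PySem.Str.lower o) ≤ 2 := by
      rw [pvRk_spec]
      split_ifs <;> omega
    rw [best_eq objects 2 (by norm_num) hlo ⟨o, ho, hhi⟩]
    decide
  rw [if_neg (fun hc => h2 ((cond_iff _ _).mp hc))]
  by_cases h3 : ∃ o ∈ objects, PySem.Str.lower o ∈ ["dining table"]
  · rw [if_pos ((cond_iff _ _).mpr h3)]
    obtain ⟨o, ho, hmem⟩ := h3
    have hlo : ∀ o ∈ objects, (3:Int) ≤ pvRk (PySem.Str.lower o) := by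
      intro o ho
      rw [pvRk_spec]
      split_ifs with q0 q1 q2 <;>
        first | omega | (exfalso; first | exact h0 ⟨o, ho, q0⟩ | exact h1 ⟨o, ho, q1⟩ | exact h2 ⟨o, ho, q2⟩)
    have hhi : pvRk (PySem.Str.lower o) ≤ 3 := by
      rw [pvRk_spec]
      split_ifs <;> omega
    rw [best_eq objects 3 (by norm_num) hlo ⟨o, ho, hhi⟩]
    decide
  rw [if_neg (fun hc => h3 ((cond_iff _ _).mp hc))]
  by_cases h4 : ∃ o ∈ objects, PySem.Str.lower o ∈ ["couch", "sofa", "tv", "chair"]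
  · rw [if_pos ((cond_iff _ _).mpr h4)]
    obtain ⟨o, ho, hmem⟩ := h4
    have hlo : ∀ o ∈ objects, (4:Int) ≤ pvRk (PySem.Str.lower o) := by
      intro o ho
      rw [pvRk_spec]
      split_ifs with q0 q1 q2 q3 <;>
        first | omega | (exfalso; first | exact h0 ⟨o, ho, q0⟩ | exact h1 ⟨o, ho, q1⟩ | exact h2 ⟨o, ho, q2⟩ | exact h3 ⟨o, ho, q3⟩)
    have hhi : pvRk (PySem.Str.lower o) ≤ 4 := by
      rw [pvRk_spec]
      split_ifs <;> omega
    rw [best_eq objects 4 (by norm_num) hlo ⟨o, ho, hhi⟩]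
    decide
  rw [if_neg (fun hc => h4 ((cond_iff _ _).mp hc))]
  by_cases h5 : ∃ o ∈ objects, PySem.Str.lower o ∈ ["washing machine"]
  · rw [if_pos ((cond_iff _ _).mpr h5)]
    obtain ⟨o, ho, hmem⟩ := h5
    have hlo : ∀ o ∈ objects, (5:Int) ≤ pvRk (PySem.Str.lower o) := by
      intro o ho
      rw [pvRk_spec]
      split_ifs with q0 q1 q2 q3 q4 <;>
        first | omega | (exfalso; first | exact h0 ⟨o, ho, q0⟩ | exact h1 ⟨o, ho, q1⟩ | exact h2 ⟨o, ho, q2⟩ | exact h3 ⟨o, ho, q3⟩ | exact h4 ⟨o, ho, q4⟩)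
    have hhi : pvRk (PySem.Str.lower o) ≤ 5 := by
      rw [pvRk_spec]
      split_ifs <;> omega
    rw [best_eq objects 5 (by norm_num) hlo ⟨o, ho, hhi⟩]
    decide
  rw [if_neg (fun hc => h5 ((cond_iff _ _).mp hc))]
  have hlo : ∀ o ∈ objects, (6:Int) ≤ pvRk (PySem.Str.lower o) := by
    intro o ho
    rw [pvRk_spec]
    split_ifs with q0 q1 q2 q3 q4 q5 <;>
      first | omega | (exfalso; first | exact h0 ⟨o, ho, q0⟩ | exact h1 ⟨o, ho, q1⟩ | exact h2 ⟨o, ho, q2⟩ | exact h3 ⟨o, ho, q3⟩ | exact h4 ⟨o, ho, q4⟩ | exact h5 ⟨o, ho, q5⟩)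
  rw [best_eq_six objects hlo]
  decide

-- ===== VERDICT (by name: the statement is the Claim_ definition above) =====
theorem infer_room_from_yolo_py_spec : Claim_equal_infer_room_from_yolo_py := by
  intro objects _
  exact infer_room_eq objects
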